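-- pv_equiv track=rewrite | github.com/hurjun/hurjun-Baekjoon | 프로그래머스/unrated/181874. A 강조하기/A 강조하기.py | solution
-- ===== SOURCE A (Python) =====
-- def solution(myString):
--     answer = ''
--     a=list(myString)
--     for i in range(len(a)):
--         if a[i]=='a' or a[i]=="A":
--             answer+='A'
--         else:
--             answer+=a[i].lower()
--     return answer
-- ===== SOURCE B (Python) =====
-- def solution(myString):
--     return myString.lower().replace('a', 'A')
-- ===== Notes on version B (the rewrite author's own statement) =====
-- stated objective: idiomatic
-- what changed: Replaced the explicit index loop with its per-character branch by two whole-string library passes: lowercase the whole string, then replace each lowercase letter a with uppercase A.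
import Mathlib
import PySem

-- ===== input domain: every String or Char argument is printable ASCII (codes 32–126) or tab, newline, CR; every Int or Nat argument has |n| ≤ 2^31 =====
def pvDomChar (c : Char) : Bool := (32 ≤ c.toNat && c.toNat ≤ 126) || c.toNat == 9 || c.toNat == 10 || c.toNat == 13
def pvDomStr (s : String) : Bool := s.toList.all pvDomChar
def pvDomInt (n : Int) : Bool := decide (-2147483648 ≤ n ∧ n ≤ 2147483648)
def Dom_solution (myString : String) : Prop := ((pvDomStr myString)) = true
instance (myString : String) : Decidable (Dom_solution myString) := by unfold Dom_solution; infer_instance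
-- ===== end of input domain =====

-- B replaces A's explicit index loop (per-char branch, build-up by concatenation)
-- by two whole-string library passes: lower() then replace('a','A') — idiomatic, same cost.

-- ===== PORT A =====
def solution (myString : String) : String :=
  let a := myString.toList
  String.ofList ((PySem.List.pyRange 0 (PySem.List.len a) 1).foldl
    (fun answer i =>
      let c := PySem.List.pyGetD a i ' '   -- index always in range (range(len(a)))
      if c == 'a' || c == 'A' then answer ++ ['A']
      else answer ++ PySem.Chars.lower [c]) [])

-- ===== PORT B =====
def solution_alt (myString : String) : String :=
  PySem.Str.replace (PySem.Str.lower myString) "a" "A"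

-- ===== PRECONDITION & SPEC =====
def Spec_solution (myString : String) (out : String) : Prop := out = solution_alt myString
instance (myString : String) (out : String) : Decidable (Spec_solution myString out) := by unfold Spec_solution; infer_instance

-- ===== CLAIM (what is proved, stated in full; the proofs are below) =====
def Claim_equal_solution : Prop := ∀ (myString : String), Dom_solution myString → Spec_solution myString (solution myString)

-- ===== LEMMAS AND PROOFS =====

-- replacing the single char 'a' by 'A' is a pointwise map
theorem replace_go_step_a (t acc : List Char) (n : Nat) :
    PySem.Chars.replace.go ['a'] ['A'] (n+1) ('a'::t) acc
      = PySem.Chars.replace.go ['a'] ['A'] n t ('A'::acc) := by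
  rw [PySem.Chars.replace.go.eq_def]
  simp [List.isPrefixOf]

theorem replace_go_step_ne (t acc : List Char) (n : Nat) (c : Char) (hc : c ≠ 'a') :
    PySem.Chars.replace.go ['a'] ['A'] (n+1) (c::t) acc
      = PySem.Chars.replace.go ['a'] ['A'] n t (c::acc) := by
  rw [PySem.Chars.replace.go.eq_def]
  simp [List.isPrefixOf, Ne.symm hc]

theorem replace_go_a (l acc : List Char) (fuel : Nat) (h : l.length ≤ fuel) :
    PySem.Chars.replace.go ['a'] ['A'] fuel l acc
      = acc.reverse ++ l.map (fun c => if c = 'a' then 'A' else c) := by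
  induction l generalizing fuel acc with
  | nil => cases fuel <;> simp [PySem.Chars.replace.go]
  | cons c t ih =>
    cases fuel with
    | zero => simp at h
    | succ n =>
      have hn : t.length ≤ n := by simpa using h
      by_cases hc : c = 'a'
      · subst hc
        rw [replace_go_step_a, ih ('A'::acc) n hn]
        simp
      · rw [replace_go_step_ne t acc n c hc, ih (c::acc) n hn]
        simp [hc]

theorem replace_a (l : List Char) :
    PySem.Chars.replace l ['a'] ['A'] = l.map (fun c => if c = 'a' then 'A' else c) := by
  simpa [PySem.Chars.replace] using replace_go_a l [] l.length le_rfl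

-- per-character: A's branch equals lower-then-replace
theorem char_step (c : Char) :
    (if PySem.Chars.lowerChar c = 'a' then 'A' else PySem.Chars.lowerChar c)
      = (if c == 'a' || c == 'A' then 'A' else PySem.Chars.lowerChar c) := by
  by_cases h1 : c = 'a'
  · subst h1; simp [PySem.Chars.lowerChar, PySem.Chars.isupper]
  · by_cases h2 : c = 'A'
    · subst h2; decide
    · have hne : PySem.Chars.lowerChar c ≠ 'a' := by
        unfold PySem.Chars.lowerChar
        split_ifs with hu
        · simp only [PySem.Chars.isupper, Bool.and_eq_true, decide_eq_true_eq] at hu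
          intro hEq
          apply h2
          have h65 : 65 ≤ c.toNat := hu.1
          have h90 : c.toNat ≤ 90 := hu.2
          have hv : Nat.isValidChar (c.toNat + 32) := Or.inl (by omega)
          have ht : (Char.ofNat (c.toNat + 32)).toNat = c.toNat + 32 := by
            simp only [Char.ofNat, dif_pos hv]; rfl
          have h97 : c.toNat + 32 = 97 := by rw [← ht, hEq]; rfl
          have hc65 : c.toNat = 65 := by omega
          have := Char.ofNat_toNat c
          rw [hc65] at this
          exact this.symm
        · exact h1
      simp [hne, h1, h2]

-- A's fold builds the pointwise map
theorem a_fold (l : List Char) (acc : List Char) :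
    l.foldl (fun answer c =>
        if c == 'a' || c == 'A' then answer ++ ['A']
        else answer ++ PySem.Chars.lower [c]) acc
      = acc ++ l.map (fun c => if c == 'a' || c == 'A' then 'A' else PySem.Chars.lowerChar c) := by
  induction l generalizing acc with
  | nil => simp
  | cons c t ih =>
    simp only [List.foldl_cons, List.map_cons]
    by_cases h : (c == 'a' || c == 'A') = true
    · rw [if_pos h, ih, if_pos h]; simp
    · rw [if_neg h, ih, if_neg h]; simp [PySem.Chars.lower]

-- ===== VERDICT (by name: the statement is the Claim_ definition above) =====
theorem solution_spec : Claim_equal_solution := by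
  intro s _
  unfold Spec_solution solution solution_alt
  apply String.ext  -- compare as char lists
  rw [PySem.Str.toList_replace]
  simp only [PySem.Str.toList_lower]
  rw [PySem.List.foldl_pyRange_zero_pyGetD s.toList ' '
      (fun answer c =>
        if c == 'a' || c == 'A' then answer ++ ['A']
        else answer ++ PySem.Chars.lower [c]) []]
  rw [a_fold]
  show _ = PySem.Chars.replace (PySem.Chars.lower s.toList) ['a'] ['A']
  rw [replace_a]
  simp only [PySem.Chars.lower, List.map_map, List.nil_append, String.toList_ofList]
  apply List.map_congr_left
  intro c _
  simpa using (char_step c).symm
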